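-- pv_equiv track=rewrite | github.com/myp020301/NODDI_rank | my_code/a.py | make_list_txt
-- ===== SOURCE A (Python) =====
-- def make_list_txt(ret_list, names, lists):
--     rets = {}
--     for ret in ret_list:
--         path_ret_root = ret
--         for item in zip(names, lists):
--             if rets.get(item[0], None) is None:
--                 rets[item[0]] = []
--             rets[item[0]].append(path_ret_root + "/" + item[1])
--
--     return rets
-- ===== SOURCE B (Python) =====
-- def make_list_txt(ret_list, names, lists):
--     if not ret_list:
--         return {}
--     groups = {}
--     for name, val in zip(names, lists):
--         groups.setdefault(name, []).append(val)
--     return {name: [ret + "/" + v for ret in ret_list for v in vals]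
--             for name, vals in groups.items()}
-- ===== Notes on version B (the rewrite author's own statement) =====
-- stated objective: alternative
-- what changed: B groups the zipped (name, value) pairs once into an index dict and then emits each key's full list with one cross-product comprehension, instead of A's per-ret re-scan that repeatedly looks up and appends into the result dict.
import Mathlib
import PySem

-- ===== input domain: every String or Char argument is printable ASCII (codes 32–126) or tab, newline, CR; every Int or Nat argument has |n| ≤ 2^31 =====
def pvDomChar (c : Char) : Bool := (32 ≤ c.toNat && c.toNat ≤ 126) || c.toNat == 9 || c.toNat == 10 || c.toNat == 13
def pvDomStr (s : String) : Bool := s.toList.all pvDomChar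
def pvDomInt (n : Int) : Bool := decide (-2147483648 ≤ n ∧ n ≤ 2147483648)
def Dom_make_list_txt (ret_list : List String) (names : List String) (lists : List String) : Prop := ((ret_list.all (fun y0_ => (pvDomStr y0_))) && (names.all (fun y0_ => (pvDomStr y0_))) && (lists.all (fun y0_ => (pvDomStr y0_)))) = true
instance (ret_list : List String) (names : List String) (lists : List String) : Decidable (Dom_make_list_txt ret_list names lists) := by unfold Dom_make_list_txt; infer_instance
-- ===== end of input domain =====

-- B groups the (name, value) pairs once, then emits each key's list as one cross product over ret_list
-- (alternative decomposition: group-then-cross-product instead of A's per-ret dict lookups and appends).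

-- ===== PORT A =====
def make_list_txt (ret_list : List String) (names : List String) (lists : List String) : List (String × List String) :=
  (ret_list.foldl (fun rets ret =>
      (names.zip lists).foldl (fun rets item =>
        -- 'if rets.get(item[0], None) is None: rets[item[0]] = []' then 'rets[item[0]].append(...)'
        -- (the append mutates the stored list; modelled as Dict.modify on the present key)
        let rets' := if rets.get? item.1 = none then rets.insert item.1 [] else rets
        rets'.modify item.1 [] (fun l => l ++ [ret ++ "/" ++ item.2])) rets)
    PySem.Dict.empty).items

-- ===== PORT B =====
def make_list_txt_alt (ret_list : List String) (names : List String) (lists : List String) : List (String × List String) :=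
  if ret_list = [] then []
  else
    -- groups.setdefault(name, []).append(val)  (append mutates the stored list: Dict.modify with default [])
    let groups := (names.zip lists).foldl (fun g p => g.modify p.1 [] (fun l => l ++ [p.2])) PySem.Dict.empty
    groups.items.map (fun q => (q.1, ret_list.flatMap (fun ret => q.2.map (fun v => ret ++ "/" ++ v))))

-- ===== PRECONDITION & SPEC =====
def Spec_make_list_txt (ret_list : List String) (names : List String) (lists : List String) (out : List (String × List String)) : Prop := out = make_list_txt_alt ret_list names lists
instance (ret_list : List String) (names : List String) (lists : List String) (out : List (String × List String)) : Decidable (Spec_make_list_txt ret_list names lists out) := by unfold Spec_make_list_txt; infer_instance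

-- ===== CLAIM (what is proved, stated in full; the proofs are below) =====
def Claim_equal_make_list_txt : Prop := ∀ (ret_list : List String) (names : List String) (lists : List String), Dom_make_list_txt ret_list names lists → Spec_make_list_txt ret_list names lists (make_list_txt ret_list names lists)

-- ===== LEMMAS AND PROOFS =====

-- A's "insert [] if absent, then append" step is exactly Dict.modify with default [].
theorem stepA_eq (d : PySem.Dict String (List String)) (k : String) (f : List String → List String) :
    (if d.get? k = none then d.insert k [] else d).modify k [] f = d.modify k [] f := by
  by_cases h : d.get? k = none
  · simp only [h, if_pos, PySem.Dict.modify, PySem.Dict.getD_insert_self,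
      PySem.Dict.insert_insert_self]
    have hc : d.contains k = false := by
      rw [PySem.Dict.contains_eq_isSome_get?, h]; rfl
    rw [PySem.Dict.getD_of_not_contains d [] hc]
  · simp [h]

-- one outer iteration of A rewritten as the canonical grouping fold
theorem innerA_eq (d : PySem.Dict String (List String)) (ret : String) (pairs : List (String × String)) :
    pairs.foldl (fun rets item =>
        (if rets.get? item.1 = none then rets.insert item.1 [] else rets).modify item.1 []
          (fun l => l ++ [ret ++ "/" ++ item.2])) d
      = (pairs.map (fun p => (p.1, ret ++ "/" ++ p.2))).foldl
          (fun d p => d.modify p.1 [] (fun l => l ++ [p.2])) d := by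
  rw [List.foldl_map]
  exact PySem.List.foldl_congr_mem pairs _ _ d
    (fun acc x _ => stepA_eq acc x.1 (fun l => l ++ [ret ++ "/" ++ x.2]))

theorem upd_idem {α : Type} [BEq α] [LawfulBEq α] (s : PySem.Set α) (xs : List α) :
    PySem.Set.update (PySem.Set.update s xs) xs = PySem.Set.update s xs := by
  rw [PySem.Set.update_eq_append_filter (PySem.Set.update s xs) xs]
  have h : (PySem.Set.ofList xs).filter (fun y => !(PySem.Set.update s xs).contains y) = [] := by
    rw [List.filter_eq_nil_iff]
    intro y hy
    have hyx : y ∈ xs := (PySem.Set.mem_ofList xs y).1 hy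
    have hmem : y ∈ PySem.Set.update s xs := (PySem.Set.mem_update s xs y).2 (Or.inr hyx)
    simp
    exact fun _ => hyx
  rw [h, List.append_nil]

theorem outerA_keys (pairs : List (String × String)) :
    ∀ (rs : List String) (d : PySem.Dict String (List String)), rs ≠ [] →
      (rs.foldl (fun rets ret =>
          pairs.foldl (fun rets item =>
            (if rets.get? item.1 = none then rets.insert item.1 [] else rets).modify item.1 []
              (fun l => l ++ [ret ++ "/" ++ item.2])) rets) d).keys
        = PySem.Set.update d.keys (pairs.map Prod.fst) := by
  intro rs
  induction rs with
  | nil => intro d h; exact absurd rfl h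
  | cons r rs ih =>
    intro d _
    simp only [List.foldl_cons]
    have hstep : ∀ (ret : String) (d : PySem.Dict String (List String)),
        (pairs.foldl (fun rets item =>
          (if rets.get? item.1 = none then rets.insert item.1 [] else rets).modify item.1 []
            (fun l => l ++ [ret ++ "/" ++ item.2])) d).keys
          = PySem.Set.update d.keys (pairs.map Prod.fst) := by
      intro ret d
      rw [innerA_eq]
      rw [PySem.Dict.keys_foldl_modify_key _ Prod.fst [] (fun _ p => fun l => l ++ [p.2])]
      simp [Function.comp_def]
    by_cases hrs : rs = []
    · subst hrs; simpa using hstep r d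
    · rw [ih _ hrs, hstep r d, upd_idem]

theorem outerA_getD (pairs : List (String × String)) (k : String) :
    ∀ (rs : List String) (d : PySem.Dict String (List String)),
      (rs.foldl (fun rets ret =>
          pairs.foldl (fun rets item =>
            (if rets.get? item.1 = none then rets.insert item.1 [] else rets).modify item.1 []
              (fun l => l ++ [ret ++ "/" ++ item.2])) rets) d).getD k []
        = d.getD k [] ++ rs.flatMap (fun r =>
            ((pairs.filter (fun p => p.1 == k)).map (fun p => p.2)).map (fun v => r ++ "/" ++ v)) := by
  intro rs
  induction rs with
  | nil => intro d; simp
  | cons r rs ih =>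
    intro d
    simp only [List.foldl_cons, List.flatMap_cons]
    rw [ih]
    have hstep : (pairs.foldl (fun rets item =>
        (if rets.get? item.1 = none then rets.insert item.1 [] else rets).modify item.1 []
          (fun l => l ++ [r ++ "/" ++ item.2])) d).getD k []
        = d.getD k [] ++ ((pairs.filter (fun p => p.1 == k)).map (fun p => p.2)).map
            (fun v => r ++ "/" ++ v) := by
      rw [innerA_eq, PySem.Dict.getD_foldl_modify_append]
      congr 1
      rw [List.filter_map, List.map_map]
      simp [Function.comp_def]
    rw [hstep, List.append_assoc]

theorem outerA_nodup (pairs : List (String × String)) :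
    ∀ (rs : List String) (d : PySem.Dict String (List String)), d.keys.Nodup →
      (rs.foldl (fun rets ret =>
          pairs.foldl (fun rets item =>
            (if rets.get? item.1 = none then rets.insert item.1 [] else rets).modify item.1 []
              (fun l => l ++ [ret ++ "/" ++ item.2])) rets) d).keys.Nodup := by
  intro rs
  induction rs with
  | nil => intro d h; simpa using h
  | cons r rs ih =>
    intro d hd
    simp only [List.foldl_cons]
    apply ih
    rw [innerA_eq]
    exact PySem.Dict.nodup_keys_foldl_modify_key _ Prod.fst [] _ d hd

theorem AB_eq (ret_list names lists : List String) (h : ret_list ≠ []) :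
    (ret_list.foldl (fun rets ret =>
        (names.zip lists).foldl (fun rets item =>
          (if rets.get? item.1 = none then rets.insert item.1 [] else rets).modify item.1 []
            (fun l => l ++ [ret ++ "/" ++ item.2])) rets)
      PySem.Dict.empty).items
    = ((names.zip lists).foldl (fun g p => g.modify p.1 [] (fun l => l ++ [p.2]))
        PySem.Dict.empty).items.map
        (fun q => (q.1, ret_list.flatMap (fun ret => q.2.map (fun v => ret ++ "/" ++ v)))) := by
  set pairs := names.zip lists with hp
  set G := pairs.foldl (fun g p => g.modify p.1 [] (fun l => l ++ [p.2])) PySem.Dict.empty with hG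
  have hGkeys : G.keys = PySem.Set.ofList (pairs.map Prod.fst) := by
    rw [hG, PySem.Dict.keys_foldl_modify_key _ Prod.fst [] (fun _ p => fun l => l ++ [p.2])]
    simp [PySem.Set.update_nil_left]
  have hGnodup : G.keys.Nodup := by
    rw [hG]
    exact PySem.Dict.nodup_keys_foldl_modify_key _ Prod.fst [] _ _ (by simp)
  have hGget : ∀ k, G.getD k [] = (pairs.filter (fun p => p.1 == k)).map (fun p => p.2) := by
    intro k
    rw [hG, PySem.Dict.getD_foldl_modify_append]
    simp
  have hAkeys := outerA_keys pairs ret_list PySem.Dict.empty h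
  have hAnodup := outerA_nodup pairs ret_list PySem.Dict.empty (by simp)
  rw [PySem.Dict.items_eq_map_keys _ hAnodup [], PySem.Dict.items_eq_map_keys G hGnodup []]
  rw [List.map_map, hAkeys, hGkeys]
  have hupd : PySem.Set.update (PySem.Dict.empty : PySem.Dict String (List String)).keys
      (pairs.map Prod.fst) = PySem.Set.ofList (pairs.map Prod.fst) := by
    simp [PySem.Set.update_nil_left]
  rw [hupd]
  apply List.map_congr_left
  intro k _
  rw [outerA_getD pairs k ret_list PySem.Dict.empty]
  simp only [Function.comp_def, hGget k]
  simp

-- ===== VERDICT (by name: the statement is the Claim_ definition above) =====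
theorem make_list_txt_spec : Claim_equal_make_list_txt := by
  intro ret_list names lists _
  unfold Spec_make_list_txt make_list_txt make_list_txt_alt
  by_cases h : ret_list = []
  · subst h; rfl
  · rw [if_neg h]
    exact AB_eq ret_list names lists h
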